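-- pv_equiv track=rewrite | github.com/robmillersoftware/mtg-deckbuilder | src/evaluation/simulation_engine.py | _estimate_colors
-- ===== SOURCE A (Python) =====
-- from typing import Dict, List, Optional, Tuple
--
-- def _estimate_colors(name: str) -> List[str]:
--     """Estimate card colors"""
--     name_lower = name.lower()
--     colors = []
--
--     if any(word in name_lower for word in ['lightning', 'fire', 'red', 'mountain']):
--         colors.append('R')
--     if any(word in name_lower for word in ['island', 'blue', 'counter', 'draw']):
--         colors.append('U')
--     if any(word in name_lower for word in ['swamp', 'black', 'death', 'destroy']):
--         colors.append('B')
--     if any(word in name_lower for word in ['forest', 'green', 'ramp', 'growth']):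
--         colors.append('G')
--     if any(word in name_lower for word in ['plains', 'white', 'angel', 'knight']):
--         colors.append('W')
--
--     return colors if colors else ['C']  # Colorless if no colors detected
-- ===== SOURCE B (Python) =====
-- _KEYWORD_COLOR = {
--     'lightning': 'R', 'fire': 'R', 'red': 'R', 'mountain': 'R',
--     'island': 'U', 'blue': 'U', 'counter': 'U', 'draw': 'U',
--     'swamp': 'B', 'black': 'B', 'death': 'B', 'destroy': 'B',
--     'forest': 'G', 'green': 'G', 'ramp': 'G', 'growth': 'G',
--     'plains': 'W', 'white': 'W', 'angel': 'W', 'knight': 'W',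
-- }
--
-- def _estimate_colors(name: str):
--     """Estimate card colors by a single multi-pattern scan over the name:
--     at each position, try every keyword as an anchored prefix match, collect
--     the matched colors in a set, then emit them in canonical R,U,B,G,W order."""
--     s = name.lower()
--     found = set()
--     for i in range(len(s)):
--         for word, color in _KEYWORD_COLOR.items():
--             if s.startswith(word, i):
--                 found.add(color)
--     return [c for c in 'RUBGW' if c in found] or ['C']
-- ===== Notes on version B (the rewrite author's own statement) =====
-- stated objective: alternative
-- what changed: Instead of five independent whole-string substring tests (one any() per color), B does one position-driven multi-pattern scan: it slides over the lowercased name once and at each position tries every keyword as an anchored prefix match against a flat keyword-to-color dict, collecting matched colors in a set, then emits them by filtering the canonical color order R,U,B,G,W; correct because a word occurs in a string iff it is a prefix of some suffix.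
import Mathlib
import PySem

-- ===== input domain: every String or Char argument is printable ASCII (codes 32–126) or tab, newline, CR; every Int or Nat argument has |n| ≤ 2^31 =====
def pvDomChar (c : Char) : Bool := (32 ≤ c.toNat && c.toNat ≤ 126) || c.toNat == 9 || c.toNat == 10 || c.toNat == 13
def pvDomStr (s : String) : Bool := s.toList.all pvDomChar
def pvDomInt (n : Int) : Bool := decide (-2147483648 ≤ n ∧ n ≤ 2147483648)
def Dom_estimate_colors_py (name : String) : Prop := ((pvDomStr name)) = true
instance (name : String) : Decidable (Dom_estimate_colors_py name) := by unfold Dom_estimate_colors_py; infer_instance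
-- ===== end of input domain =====

-- B replaces A's five per-color whole-string substring tests with one position-driven
-- multi-pattern scan (anchored prefix matches into a flat keyword->color table, colors
-- collected in a set and emitted in canonical order); objective: alternative.

-- ===== PORT A =====
def estimate_colors_py (name : String) : List String :=
  let name_lower := PySem.Str.lower name
  let colors : List String := []
  let colors := if (["lightning", "fire", "red", "mountain"] : List String).any
      (fun word => PySem.Str.isIn word name_lower) then colors ++ ["R"] else colors
  let colors := if (["island", "blue", "counter", "draw"] : List String).any
      (fun word => PySem.Str.isIn word name_lower) then colors ++ ["U"] else colors
  let colors := if (["swamp", "black", "death", "destroy"] : List String).any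
      (fun word => PySem.Str.isIn word name_lower) then colors ++ ["B"] else colors
  let colors := if (["forest", "green", "ramp", "growth"] : List String).any
      (fun word => PySem.Str.isIn word name_lower) then colors ++ ["G"] else colors
  let colors := if (["plains", "white", "angel", "knight"] : List String).any
      (fun word => PySem.Str.isIn word name_lower) then colors ++ ["W"] else colors
  if colors.isEmpty then ["C"] else colors

-- ===== PORT B =====
-- the flat keyword -> color dict _KEYWORD_COLOR, in insertion order
def pvKeywordColor : List (String × String) :=
  [("lightning", "R"), ("fire", "R"), ("red", "R"), ("mountain", "R"),
   ("island", "U"), ("blue", "U"), ("counter", "U"), ("draw", "U"),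
   ("swamp", "B"), ("black", "B"), ("death", "B"), ("destroy", "B"),
   ("forest", "G"), ("green", "G"), ("ramp", "G"), ("growth", "G"),
   ("plains", "W"), ("white", "W"), ("angel", "W"), ("knight", "W")]

-- inner loop: 'for word, color in _KEYWORD_COLOR.items(): if s.startswith(word, i): found.add(color)'
-- (s.startswith(word, i) with 0 ≤ i ≤ len(s) is exact as a prefix test on s.drop i.toNat)
def pvScanPos (s : List Char) (found : PySem.Set String) (i : Int) : PySem.Set String :=
  pvKeywordColor.foldl (fun acc p =>
    if PySem.Chars.startswith (s.drop i.toNat) p.1.toList then PySem.Set.add acc p.2 else acc) found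

def estimate_colors_py_alt (name : String) : List String :=
  let s := PySem.Chars.lower name.toList
  let found := (PySem.List.pyRange 0 (s.length : Int) 1).foldl (pvScanPos s) PySem.Set.empty
  let colors := (["R", "U", "B", "G", "W"] : List String).filter (fun c => found.contains c)
  if colors.isEmpty then ["C"] else colors

-- ===== PRECONDITION & SPEC =====
def Spec_estimate_colors_py (name : String) (out : List String) : Prop := out = estimate_colors_py_alt name
instance (name : String) (out : List String) : Decidable (Spec_estimate_colors_py name out) := by unfold Spec_estimate_colors_py; infer_instance

-- ===== CLAIM (what is proved, stated in full; the proofs are below) =====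
def Claim_equal_estimate_colors_py : Prop := ∀ (name : String), Dom_estimate_colors_py name → Spec_estimate_colors_py name (estimate_colors_py name)

-- ===== LEMMAS AND PROOFS =====

-- every keyword in the table is nonempty
lemma pvKeywordColor_words_ne_nil : ∀ p ∈ pvKeywordColor, p.1.toList ≠ [] := by
  unfold pvKeywordColor; decide

-- membership in the inner fold (one scan position)
lemma mem_pvScanPos (s : List Char) (found : PySem.Set String) (i : Int) (x : String) :
    x ∈ pvScanPos s found i ↔
      x ∈ found ∨ ∃ p ∈ pvKeywordColor,
        PySem.Chars.startswith (s.drop i.toNat) p.1.toList = true ∧ p.2 = x := by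
  unfold pvScanPos
  generalize pvKeywordColor = l
  induction l generalizing found with
  | nil => simp
  | cons hd tl ih =>
    simp only [List.foldl_cons]
    by_cases h : PySem.Chars.startswith (s.drop i.toNat) hd.1.toList = true
    · simp only [h, if_true, ih, PySem.Set.mem_add, List.mem_cons]
      constructor
      · rintro ((hx | rfl) | ⟨p, hp, hh⟩)
        · exact Or.inl hx
        · exact Or.inr ⟨hd, Or.inl rfl, h, rfl⟩
        · exact Or.inr ⟨p, Or.inr hp, hh⟩
      · rintro (hx | ⟨p, (rfl | hp), hh⟩)
        · exact Or.inl (Or.inl hx)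
        · exact Or.inl (Or.inr hh.2.symm)
        · exact Or.inr ⟨p, hp, hh⟩
    · simp only [h, ih, List.mem_cons]
      constructor
      · rintro (hx | ⟨p, hp, hh⟩)
        · exact Or.inl hx
        · exact Or.inr ⟨p, Or.inr hp, hh⟩
      · rintro (hx | ⟨p, (rfl | hp), hh⟩)
        · exact Or.inl hx
        · exact absurd hh.1 h
        · exact Or.inr ⟨p, hp, hh⟩

-- membership in the outer fold (all scan positions)
lemma mem_pvScan (s : List Char) (r : List Int) (acc : PySem.Set String) (x : String) :
    x ∈ r.foldl (pvScanPos s) acc ↔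
      x ∈ acc ∨ ∃ i ∈ r, ∃ p ∈ pvKeywordColor,
        PySem.Chars.startswith (s.drop i.toNat) p.1.toList = true ∧ p.2 = x := by
  induction r generalizing acc with
  | nil => simp
  | cons hd tl ih =>
    simp only [List.foldl_cons, ih, mem_pvScanPos, List.mem_cons]
    constructor
    · rintro ((h | h) | ⟨i, hi, h⟩)
      · exact Or.inl h
      · exact Or.inr ⟨hd, Or.inl rfl, h⟩
      · exact Or.inr ⟨i, Or.inr hi, h⟩
    · rintro (h | ⟨i, (rfl | hi), h⟩)
      · exact Or.inl (Or.inl h)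
      · exact Or.inl (Or.inr h)
      · exact Or.inr ⟨i, hi, h⟩

-- an anchored prefix match at some scanned position is exactly a substring hit (nonempty word)
lemma exists_pos_startswith_iff (s w : List Char) (hw : w ≠ []) :
    (∃ i ∈ PySem.List.pyRange 0 (s.length : Int) 1,
        PySem.Chars.startswith (s.drop i.toNat) w = true) ↔
      PySem.Chars.isIn w s = true := by
  rw [← PySem.Chars.exists_prefix_drop_iff_isIn]
  constructor
  · rintro ⟨i, hi, h⟩
    exact ⟨i.toNat, (PySem.Chars.startswith_iff _ _).mp h⟩
  · rintro ⟨j, hj⟩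
    have hjlen : j < s.length := by
      by_contra hge
      rw [List.drop_eq_nil_of_le (by omega)] at hj
      exact hw (List.prefix_nil.mp hj)
    refine ⟨(j : Int), ?_, ?_⟩
    · rw [PySem.List.mem_pyRange_one]
      exact ⟨Int.natCast_nonneg j, by exact_mod_cast hjlen⟩
    · simpa [PySem.Chars.startswith_iff] using hj

-- what the found-set contains, per color code
lemma found_contains (s : List Char) (c : String) :
    ((PySem.List.pyRange 0 (s.length : Int) 1).foldl (pvScanPos s) PySem.Set.empty).contains c = true ↔
      ∃ p ∈ pvKeywordColor, PySem.Chars.isIn p.1.toList s = true ∧ p.2 = c := by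
  rw [PySem.Set.contains_iff, mem_pvScan]
  simp only [PySem.Set.empty, List.not_mem_nil, false_or]
  constructor
  · rintro ⟨i, hi, p, hp, hpre, rfl⟩
    exact ⟨p, hp,
      (exists_pos_startswith_iff s p.1.toList (pvKeywordColor_words_ne_nil p hp)).mp ⟨i, hi, hpre⟩, rfl⟩
  · rintro ⟨p, hp, hin, rfl⟩
    obtain ⟨i, hi, hpre⟩ :=
      (exists_pos_startswith_iff s p.1.toList (pvKeywordColor_words_ne_nil p hp)).mpr hin
    exact ⟨i, hi, p, hp, hpre, rfl⟩

-- the found-set's membership of one color code equals A's any()-test for that color's group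
lemma found_contains_group (name : String) (c : String) (ws : List String)
    (hws1 : ∀ p ∈ pvKeywordColor, p.2 = c → p.1 ∈ ws)
    (hws2 : ∀ w ∈ ws, (w, c) ∈ pvKeywordColor) :
    ((PySem.List.pyRange 0 ((PySem.Chars.lower name.toList).length : Int) 1).foldl
        (pvScanPos (PySem.Chars.lower name.toList)) PySem.Set.empty).contains c
      = ws.any (fun word => PySem.Str.isIn word (PySem.Str.lower name)) := by
  rw [Bool.eq_iff_iff, found_contains, List.any_eq_true]
  constructor
  · rintro ⟨⟨w, c'⟩, hp, hin, rfl⟩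
    refine ⟨w, hws1 (w, c') hp rfl, ?_⟩
    simpa [PySem.Str.isIn_eq, PySem.Str.toList_lower] using hin
  · rintro ⟨w, hw, hin⟩
    refine ⟨(w, c), hws2 w hw, ?_, rfl⟩
    simpa [PySem.Str.isIn_eq, PySem.Str.toList_lower] using hin

-- ===== VERDICT (by name: the statement is the Claim_ definition above) =====
theorem estimate_colors_py_spec : Claim_equal_estimate_colors_py := by
  intro name _
  unfold Spec_estimate_colors_py estimate_colors_py estimate_colors_py_alt
  have hR := found_contains_group name "R" ["lightning", "fire", "red", "mountain"]
    (by unfold pvKeywordColor; decide) (by unfold pvKeywordColor; decide)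
  have hU := found_contains_group name "U" ["island", "blue", "counter", "draw"]
    (by unfold pvKeywordColor; decide) (by unfold pvKeywordColor; decide)
  have hB := found_contains_group name "B" ["swamp", "black", "death", "destroy"]
    (by unfold pvKeywordColor; decide) (by unfold pvKeywordColor; decide)
  have hG := found_contains_group name "G" ["forest", "green", "ramp", "growth"]
    (by unfold pvKeywordColor; decide) (by unfold pvKeywordColor; decide)
  have hW := found_contains_group name "W" ["plains", "white", "angel", "knight"]
    (by unfold pvKeywordColor; decide) (by unfold pvKeywordColor; decide)
  simp only [List.filter_cons, List.filter_nil, hR, hU, hB, hG, hW]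
  cases h1 : (["lightning", "fire", "red", "mountain"] : List String).any
      (fun word => PySem.Str.isIn word (PySem.Str.lower name)) <;>
  cases h2 : (["island", "blue", "counter", "draw"] : List String).any
      (fun word => PySem.Str.isIn word (PySem.Str.lower name)) <;>
  cases h3 : (["swamp", "black", "death", "destroy"] : List String).any
      (fun word => PySem.Str.isIn word (PySem.Str.lower name)) <;>
  cases h4 : (["forest", "green", "ramp", "growth"] : List String).any
      (fun word => PySem.Str.isIn word (PySem.Str.lower name)) <;>
  cases h5 : (["plains", "white", "angel", "knight"] : List String).any
      (fun word => PySem.Str.isIn word (PySem.Str.lower name)) <;>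
  simp [h1, h2, h3, h4, h5]
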